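-- pv_equiv track=rewrite | github.com/yeoeol/Algo | 백준/Gold/17406. 배열 돌리기 4/배열 돌리기 4.py | rot
-- ===== SOURCE A (Python) =====
-- from collections import deque
--
-- def rot(arr, start_x, start_y, end_x, end_y):
--     for l in range(min(end_x-start_x, end_y-start_y)//2):
--         temp = deque()
--         # 위 가로
--         for j in range(start_y+l, end_y-l):
--             temp.append(arr[start_x + l][j])
--         # 오른쪽 세로
--         for i in range(start_x+l, end_x-l):
--             temp.append(arr[i][end_y - l])
--         # 아래 가로
--         for j in range(end_y-l, start_y+l, -1):
--             temp.append(arr[end_x - l][j])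
--         # 왼쪽 세로
--         for i in range(end_x-l, start_x+l, -1):
--             temp.append(arr[i][start_y + l])
--         temp.rotate(1)
--
--         # 위 가로
--         for j in range(start_y+l, end_y-l):
--             arr[start_x + l][j] = temp.popleft()
--         # 오른쪽 세로
--         for i in range(start_x+l, end_x-l):
--             arr[i][end_y - l] = temp.popleft()
--         # 아래 가로
--         for j in range(end_y-l, start_y+l, -1):
--             arr[end_x - l][j] = temp.popleft()
--         # 왼쪽 세로
--         for i in range(end_x-l, start_x+l, -1):
--             arr[i][start_y + l] = temp.popleft()
--     return arr
-- ===== SOURCE B (Python) =====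
-- def rot(arr, start_x, start_y, end_x, end_y):
--     for l in range(min(end_x - start_x, end_y - start_y) // 2):
--         top, bot = start_x + l, end_x - l
--         left, right = start_y + l, end_y - l
--         # perimeter coordinates, clockwise, matching the read order of the four ranges
--         perim = (
--             [(top, j) for j in range(left, right)]
--             + [(i, right) for i in range(top, bot)]
--             + [(bot, j) for j in range(right, left, -1)]
--             + [(i, left) for i in range(bot, top, -1)]
--         )
--         # single carry pass: new[k] = old[k-1], i.e. deque.rotate(1)
--         carry = arr[perim[-1][0]][perim[-1][1]]
--         for (i, j) in perim:
--             cur = arr[i][j]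
--             arr[i][j] = carry
--             carry = cur
--     return arr
-- ===== Notes on version B (the rewrite author's own statement) =====
-- stated objective: simpler
-- what changed: Each concentric ring is rotated in a single carry pass over an explicit perimeter-coordinate list (cur = arr[p]; arr[p] = carry; carry = cur) instead of A's two passes that copy the ring into a deque, rotate it, and write it back cell by cell.
import Mathlib
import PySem

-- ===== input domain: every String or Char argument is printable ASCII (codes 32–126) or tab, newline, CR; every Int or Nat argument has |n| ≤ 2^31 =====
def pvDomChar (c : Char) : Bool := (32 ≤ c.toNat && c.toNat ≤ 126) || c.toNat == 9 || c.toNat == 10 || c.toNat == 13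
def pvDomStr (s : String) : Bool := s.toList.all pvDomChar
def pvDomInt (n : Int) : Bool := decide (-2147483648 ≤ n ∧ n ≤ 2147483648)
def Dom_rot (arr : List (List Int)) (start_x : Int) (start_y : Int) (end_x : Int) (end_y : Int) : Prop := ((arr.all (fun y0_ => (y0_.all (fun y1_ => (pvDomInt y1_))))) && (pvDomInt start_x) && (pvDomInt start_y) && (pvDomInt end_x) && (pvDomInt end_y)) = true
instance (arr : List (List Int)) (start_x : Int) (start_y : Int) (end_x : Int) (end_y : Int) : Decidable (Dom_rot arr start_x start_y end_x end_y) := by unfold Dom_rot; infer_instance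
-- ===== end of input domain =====

-- B rotates each concentric ring in ONE carry pass over an explicit perimeter-coordinate
-- list instead of A's two passes through a deque buffer (copy ring → rotate → write back);
-- objective: simpler. Both Pythons mutate arr in place identically; the equivalence proved
-- here is about the returned array.

-- ===== PORT A =====
-- arr[i][j] read (used by both Pythons); exact incl. negative-index wraparound
def get2 (a : List (List Int)) (i j : Int) : Int :=
  PySem.List.pyGetD (PySem.List.pyGetD a i []) j 0
-- arr[i][j] = v (used by both Pythons); total form, exact under Pre_ (in-range indices)
def set2 (a : List (List Int)) (i j : Int) (v : Int) : List (List Int) :=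
  PySem.List.pySetD a i (PySem.List.pySetD (PySem.List.pyGetD a i []) j v)

-- one iteration of A's outer loop: build temp with four read loops, temp.rotate(1),
-- then four write loops consuming temp by popleft
def rotRingA (start_x start_y end_x end_y : Int) (a : List (List Int)) (l : Int) : List (List Int) :=
  let t1 := (PySem.List.pyRange (start_y+l) (end_y-l) 1).foldl
              (fun t j => t ++ [get2 a (start_x+l) j]) []
  let t2 := (PySem.List.pyRange (start_x+l) (end_x-l) 1).foldl
              (fun t i => t ++ [get2 a i (end_y-l)]) t1
  let t3 := (PySem.List.pyRange (end_y-l) (start_y+l) (-1)).foldl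
              (fun t j => t ++ [get2 a (end_x-l) j]) t2
  let temp := (PySem.List.pyRange (end_x-l) (start_x+l) (-1)).foldl
              (fun t i => t ++ [get2 a i (start_y+l)]) t3
  -- deque.rotate(1): last element moves to the front
  let temp' := match temp.getLast? with
               | none => temp
               | some x => x :: temp.dropLast
  let s1 := (PySem.List.pyRange (start_y+l) (end_y-l) 1).foldl
              (fun (s : List (List Int) × List Int) j =>
                (set2 s.1 (start_x+l) j (s.2.headD 0), s.2.tail)) (a, temp')
  let s2 := (PySem.List.pyRange (start_x+l) (end_x-l) 1).foldl
              (fun (s : List (List Int) × List Int) i =>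
                (set2 s.1 i (end_y-l) (s.2.headD 0), s.2.tail)) s1
  let s3 := (PySem.List.pyRange (end_y-l) (start_y+l) (-1)).foldl
              (fun (s : List (List Int) × List Int) j =>
                (set2 s.1 (end_x-l) j (s.2.headD 0), s.2.tail)) s2
  let s4 := (PySem.List.pyRange (end_x-l) (start_x+l) (-1)).foldl
              (fun (s : List (List Int) × List Int) i =>
                (set2 s.1 i (start_y+l) (s.2.headD 0), s.2.tail)) s3
  s4.1

def rot (arr : List (List Int)) (start_x : Int) (start_y : Int) (end_x : Int) (end_y : Int) : List (List Int) :=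
  (PySem.List.pyRange 0 (PySem.Int.floordiv (min (end_x-start_x) (end_y-start_y)) 2) 1).foldl
    (rotRingA start_x start_y end_x end_y) arr

-- ===== PORT B =====
-- the perimeter coordinates of ring l, clockwise (Source B's perim list)
def perimCoords (start_x start_y end_x end_y l : Int) : List (Int × Int) :=
  (PySem.List.pyRange (start_y+l) (end_y-l) 1).map (fun j => (start_x+l, j))
  ++ (PySem.List.pyRange (start_x+l) (end_x-l) 1).map (fun i => (i, end_y-l))
  ++ (PySem.List.pyRange (end_y-l) (start_y+l) (-1)).map (fun j => (end_x-l, j))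
  ++ (PySem.List.pyRange (end_x-l) (start_x+l) (-1)).map (fun i => (i, start_y+l))

-- one ring of B: carry = arr[perim[-1]]; single pass cur := arr[p]; arr[p] := carry; carry := cur
def rotRingB (start_x start_y end_x end_y : Int) (a : List (List Int)) (l : Int) : List (List Int) :=
  let perim := perimCoords start_x start_y end_x end_y l
  let lastc := PySem.List.pyGetD perim (-1) (0, 0)
  let carry0 := get2 a lastc.1 lastc.2
  (perim.foldl
    (fun (s : List (List Int) × Int) c =>
      let cur := get2 s.1 c.1 c.2
      (set2 s.1 c.1 c.2 s.2, cur))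
    (a, carry0)).1

def rot_alt (arr : List (List Int)) (start_x : Int) (start_y : Int) (end_x : Int) (end_y : Int) : List (List Int) :=
  (PySem.List.pyRange 0 (PySem.Int.floordiv (min (end_x-start_x) (end_y-start_y)) 2) 1).foldl
    (rotRingB start_x start_y end_x end_y) arr

-- ===== PRECONDITION & SPEC =====
-- Pre_ excludes exactly the calls with at least one ring whose indices leave the natural
-- bounds 0 ≤ start ≤ end < size: A raises IndexError there, except when the offending
-- indices are negative but in wrap range, where Python's negative-index wraparound silently
-- rotates cells of the opposite edges (an accident of A's indexing; A's copy-then-write and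
-- B's carry pass can even disagree there when wrapped indices alias).
def Pre_rot (arr : List (List Int)) (start_x : Int) (start_y : Int) (end_x : Int) (end_y : Int) : Prop :=
  PySem.Int.floordiv (min (end_x-start_x) (end_y-start_y)) 2 ≤ 0 ∨
  (0 ≤ start_x ∧ 0 ≤ start_y ∧ end_x < (arr.length : Int) ∧
   ∀ i : Nat, i < arr.length → start_x ≤ (i : Int) → (i : Int) ≤ end_x →
     end_y < ((arr.getD i []).length : Int))
instance (arr : List (List Int)) (start_x : Int) (start_y : Int) (end_x : Int) (end_y : Int) : Decidable (Pre_rot arr start_x start_y end_x end_y) := by unfold Pre_rot; infer_instance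

def pvWitness_rot : List (List Int) × Int × Int × Int × Int :=
  ([[1, 2, 3], [4, 5, 6], [7, 8, 9]], 0, 0, 2, 2)

def Spec_rot (arr : List (List Int)) (start_x : Int) (start_y : Int) (end_x : Int) (end_y : Int) (out : List (List Int)) : Prop := out = rot_alt arr start_x start_y end_x end_y
instance (arr : List (List Int)) (start_x : Int) (start_y : Int) (end_x : Int) (end_y : Int) (out : List (List Int)) : Decidable (Spec_rot arr start_x start_y end_x end_y out) := by unfold Spec_rot; infer_instance

-- ===== CLAIM (what is proved, stated in full; the proofs are below) =====
def Claim_equal_rot : Prop := ∀ (arr : List (List Int)) (start_x : Int) (start_y : Int) (end_x : Int) (end_y : Int), Dom_rot arr start_x start_y end_x end_y → Pre_rot arr start_x start_y end_x end_y → Spec_rot arr start_x start_y end_x end_y (rot arr start_x start_y end_x end_y)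

-- ===== LEMMAS AND PROOFS =====

-- same length and row lengths as the original array
def SameShape (arr a : List (List Int)) : Prop :=
  a.length = arr.length ∧ ∀ k : Nat, (a.getD k []).length = (arr.getD k []).length

-- a coordinate that is in bounds for a (no wraparound)
def ValidC (a : List (List Int)) (p : Int × Int) : Prop :=
  0 ≤ p.1 ∧ p.1 < (a.length : Int) ∧ 0 ≤ p.2 ∧ p.2 < ((a.getD p.1.toNat []).length : Int)

-- A's write-back phase, coordinate by coordinate, consuming the queue
def writeSeq (a : List (List Int)) : List (Int × Int) → List Int → List (List Int)
  | [], _ => a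
  | c :: cs, q => writeSeq (set2 a c.1 c.2 (q.headD 0)) cs q.tail

theorem get2_nonneg (a : List (List Int)) {i j : Int} (hi : 0 ≤ i) (hj : 0 ≤ j) :
    get2 a i j = (a.getD i.toNat []).getD j.toNat 0 := by
  simp [get2, PySem.List.pyGetD_of_nonneg _ _ hi, PySem.List.pyGetD_of_nonneg _ _ hj]

theorem set2_nonneg (a : List (List Int)) {i j : Int} (v : Int) (hi : 0 ≤ i) (hj : 0 ≤ j) :
    set2 a i j v = a.set i.toNat ((a.getD i.toNat []).set j.toNat v) := by
  simp [set2, PySem.List.pyGetD_of_nonneg _ _ hi, PySem.List.pySetD_of_nonneg _ _ hi,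
        PySem.List.pySetD_of_nonneg _ _ hj]

theorem getD_set2' (l : List (List Int)) (n k : Nat) (r : List Int) :
    (l.set n r).getD k [] = if n = k ∧ n < l.length then r else l.getD k [] := by
  simp only [List.getD_eq_getElem?_getD, List.getElem?_set]
  split_ifs with h1 h2 h3 h4 <;> ((try simp_all) <;> omega)

theorem shape_set2 (arr a : List (List Int)) {i j : Int} (v : Int)
    (hi : 0 ≤ i) (hj : 0 ≤ j) (h : SameShape arr a) : SameShape arr (set2 a i j v) := by
  obtain ⟨hlen, hrow⟩ := h
  rw [set2_nonneg a v hi hj]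
  refine ⟨by simp [hlen], fun k => ?_⟩
  rw [← hrow k, getD_set2']
  split_ifs with h
  · rw [← h.1]; simp
  · rfl

theorem get2_set2_ne (a : List (List Int)) {p q : Int × Int} (v : Int)
    (hp : 0 ≤ p.1 ∧ 0 ≤ p.2) (hq : 0 ≤ q.1 ∧ 0 ≤ q.2) (hne : q ≠ p) :
    get2 (set2 a p.1 p.2 v) q.1 q.2 = get2 a q.1 q.2 := by
  rw [set2_nonneg a v hp.1 hp.2, get2_nonneg _ hq.1 hq.2, get2_nonneg _ hq.1 hq.2]
  rw [getD_set2']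
  split_ifs with h
  · have h1 : q.1 = p.1 := by omega
    have h2 : q.2 ≠ p.2 := fun h2 => hne (Prod.ext h1 h2)
    rw [h.1, List.getD_eq_getElem?_getD,
        List.getElem?_set_ne (show p.2.toNat ≠ q.2.toNat by omega),
        ← List.getD_eq_getElem?_getD, ← h.1]
  · rfl

theorem valid_of_shape {arr a : List (List Int)} {p : Int × Int}
    (h : SameShape arr a) (hv : ValidC arr p) : ValidC a p := by
  obtain ⟨hlen, hrow⟩ := h
  obtain ⟨h1, h2, h3, h4⟩ := hv
  exact ⟨h1, by omega, h3, by rw [hrow]; omega⟩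

-- the generic write loop of A = writeSeq
theorem foldl_write (ps : List (Int × Int)) (a : List (List Int)) (q : List Int) :
    ps.foldl (fun (s : List (List Int) × List Int) c =>
        (set2 s.1 c.1 c.2 (s.2.headD 0), s.2.tail)) (a, q)
      = (writeSeq a ps q, q.drop ps.length) := by
  induction ps generalizing a q with
  | nil => simp [writeSeq]
  | cons c cs ih =>
      simp only [List.foldl_cons, writeSeq, ih]
      congr 1
      simp [← List.drop_tail]

-- shape preservation of writeSeq
theorem shape_writeSeq (arr : List (List Int)) (ps : List (Int × Int)) :
    ∀ a q, SameShape arr a → (∀ p ∈ ps, 0 ≤ p.1 ∧ 0 ≤ p.2) →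
    SameShape arr (writeSeq a ps q) := by
  induction ps with
  | nil => intro a q h _; exact h
  | cons c cs ih =>
      intro a q h hnn
      exact ih _ _ (shape_set2 arr a _ (hnn c (by simp)).1 (hnn c (by simp)).2 h)
        (fun p hp => hnn p (by simp [hp]))

-- THE HEART: B's single carry pass = A's write-back of the rotated value list
theorem carry_eq (a : List (List Int)) (ps : List (Int × Int)) (c0 : Int)
    (hnd : ps.Nodup) (hval : ∀ p ∈ ps, ValidC a p) :
    (ps.foldl (fun (s : List (List Int) × Int) c =>
        let cur := get2 s.1 c.1 c.2
        (set2 s.1 c.1 c.2 s.2, cur)) (a, c0)).1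
      = writeSeq a ps (c0 :: (ps.dropLast).map (fun p => get2 a p.1 p.2)) := by
  induction ps generalizing a c0 with
  | nil => simp [writeSeq]
  | cons p ps ih =>
      have hvp := hval p (List.mem_cons_self)
      have hsh : SameShape a (set2 a p.1 p.2 c0) :=
        shape_set2 a a c0 hvp.1 hvp.2.2.1 ⟨rfl, fun _ => rfl⟩
      have hnp : p ∉ ps := (List.nodup_cons.1 hnd).1
      have hmap : (ps.dropLast).map (fun q => get2 (set2 a p.1 p.2 c0) q.1 q.2)
          = (ps.dropLast).map (fun q => get2 a q.1 q.2) := by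
        refine List.map_congr_left (fun q hq => ?_)
        have hqm : q ∈ ps := List.dropLast_subset ps hq
        have hvq := hval q (List.mem_cons_of_mem _ hqm)
        exact get2_set2_ne a c0 ⟨hvp.1, hvp.2.2.1⟩ ⟨hvq.1, hvq.2.2.1⟩
          (fun h => hnp (h ▸ hqm))
      simp only [List.foldl_cons]
      rw [ih (set2 a p.1 p.2 c0) (get2 a p.1 p.2)
            (List.nodup_cons.1 hnd).2
            (fun q hq => valid_of_shape hsh (hval q (List.mem_cons_of_mem _ hq))),
          hmap]
      cases ps with
      | nil => simp [writeSeq]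
      | cons x xs =>
          rw [List.dropLast_cons₂]
          simp only [writeSeq, List.map_cons, List.headD_cons, List.tail_cons]

theorem foldl_write_row (xs : List Int) (T : Int) (s : List (List Int) × List Int) :
    xs.foldl (fun (s : List (List Int) × List Int) j =>
        (set2 s.1 T j (s.2.headD 0), s.2.tail)) s
      = (writeSeq s.1 (xs.map (fun j => (T, j))) s.2, s.2.drop xs.length) := by
  obtain ⟨a, q⟩ := s
  have h := foldl_write (xs.map (fun j => (T, j))) a q
  rw [List.foldl_map] at h
  simpa using h

theorem foldl_write_col (xs : List Int) (C : Int) (s : List (List Int) × List Int) :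
    xs.foldl (fun (s : List (List Int) × List Int) i =>
        (set2 s.1 i C (s.2.headD 0), s.2.tail)) s
      = (writeSeq s.1 (xs.map (fun i => (i, C))) s.2, s.2.drop xs.length) := by
  obtain ⟨a, q⟩ := s
  have h := foldl_write (xs.map (fun i => (i, C))) a q
  rw [List.foldl_map] at h
  simpa using h

theorem writeSeq_append (ps ps' : List (Int × Int)) (a : List (List Int)) (q : List Int) :
    writeSeq a (ps ++ ps') q = writeSeq (writeSeq a ps q) ps' (q.drop ps.length) := by
  induction ps generalizing a q with
  | nil => simp [writeSeq]
  | cons c cs ih => simp [writeSeq, ih, ← List.drop_tail]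

-- A's four read loops produce exactly the values along perimCoords
theorem readA_eq (a : List (List Int)) (sx sy ex ey l : Int) :
    rotRingA sx sy ex ey a l
      = (let temp := (perimCoords sx sy ex ey l).map (fun p => get2 a p.1 p.2)
         let temp' := match temp.getLast? with
                      | none => temp
                      | some x => x :: temp.dropLast
         writeSeq a (perimCoords sx sy ex ey l) temp') := by
  simp only [rotRingA, perimCoords, PySem.List.foldl_append_singleton_eq_map,
    List.nil_append, List.map_append, List.map_map, Function.comp_def,
    foldl_write_row, foldl_write_col]
  simp [writeSeq_append, List.drop_drop]

theorem nodup_perim (sx sy ex ey l : Int) (hx : sx + l + 2 ≤ ex - l) (hy : sy + l + 2 ≤ ey - l) :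
    (perimCoords sx sy ex ey l).Nodup := by
  have injr : ∀ c : Int, Function.Injective (fun j : Int => (c, j)) :=
    fun c a b h => by simpa using h
  have injc : ∀ c : Int, Function.Injective (fun i : Int => (i, c)) :=
    fun c a b h => by simpa using h
  unfold perimCoords
  rw [PySem.List.pyRange_neg_one_eq_reverse, PySem.List.pyRange_neg_one_eq_reverse]
  simp [List.nodup_append, PySem.List.mem_pyRange_one, Prod.ext_iff]
  exact ⟨List.Nodup.map (injr (sx+l)) (PySem.List.nodup_pyRange_one _ _),
    ⟨List.Nodup.map (injc (ey-l)) (PySem.List.nodup_pyRange_one _ _),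
      ⟨List.Nodup.map (injr (ex-l)) (PySem.List.nodup_pyRange_one _ _),
        List.Nodup.map (injc (sy+l)) (PySem.List.nodup_pyRange_one _ _), by omega⟩,
      by omega⟩, by omega⟩

theorem mem_perim {sx sy ex ey l : Int} {p : Int × Int}
    (hp : p ∈ perimCoords sx sy ex ey l) (hl : 0 ≤ l)
    (hx : sx + l + 2 ≤ ex - l) (hy : sy + l + 2 ≤ ey - l) :
    sx ≤ p.1 ∧ p.1 ≤ ex ∧ sy ≤ p.2 ∧ p.2 ≤ ey := by
  simp only [perimCoords, List.mem_append, List.mem_map, PySem.List.mem_pyRange_one,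
    PySem.List.mem_pyRange_neg_one] at hp
  rcases hp with ((⟨j, ⟨h1, h2⟩, rfl⟩ | ⟨i, ⟨h1, h2⟩, rfl⟩) | ⟨j, ⟨h1, h2⟩, rfl⟩) |
    ⟨i, ⟨h1, h2⟩, rfl⟩ <;> refine ⟨?_, ?_, ?_, ?_⟩ <;> (try simp) <;> omega

theorem perim_ne_nil {sx sy ex ey l : Int}
    (hy : sy + l + 2 ≤ ey - l) : perimCoords sx sy ex ey l ≠ [] := by
  apply List.ne_nil_of_length_pos
  simp [perimCoords, PySem.List.length_pyRange_one]
  omega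

theorem ring_eq (arr : List (List Int)) (sx sy ex ey : Int) (a : List (List Int)) (l : Int)
    (hsh : SameShape arr a)
    (hx : sx + l + 2 ≤ ex - l) (hy : sy + l + 2 ≤ ey - l)
    (hval : ∀ p ∈ perimCoords sx sy ex ey l, ValidC arr p) :
    rotRingA sx sy ex ey a l = rotRingB sx sy ex ey a l ∧
    SameShape arr (rotRingA sx sy ex ey a l) := by
  have hne : perimCoords sx sy ex ey l ≠ [] := perim_ne_nil hy
  have hlast : (perimCoords sx sy ex ey l).getLast? =
      some ((perimCoords sx sy ex ey l).getLast hne) := List.getLast?_eq_some_getLast hne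
  have hA : rotRingA sx sy ex ey a l
      = writeSeq a (perimCoords sx sy ex ey l)
          (get2 a ((perimCoords sx sy ex ey l).getLast hne).1
                  ((perimCoords sx sy ex ey l).getLast hne).2
            :: ((perimCoords sx sy ex ey l).dropLast).map (fun p => get2 a p.1 p.2)) := by
    rw [readA_eq]
    simp only [List.getLast?_map, hlast, Option.map_some, List.map_dropLast]
  have hvala : ∀ p ∈ perimCoords sx sy ex ey l, ValidC a p :=
    fun p hp => valid_of_shape hsh (hval p hp)
  have hB : rotRingB sx sy ex ey a l
      = writeSeq a (perimCoords sx sy ex ey l)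
          (get2 a ((perimCoords sx sy ex ey l).getLast hne).1
                  ((perimCoords sx sy ex ey l).getLast hne).2
            :: ((perimCoords sx sy ex ey l).dropLast).map (fun p => get2 a p.1 p.2)) := by
    simp only [rotRingB, PySem.List.pyGetD_neg_one _ _ hne]
    exact carry_eq a _ _ (nodup_perim sx sy ex ey l hx hy) hvala
  refine ⟨hA.trans hB.symm, ?_⟩
  rw [hA]
  exact shape_writeSeq arr _ a _ hsh
    (fun p hp => ⟨(hvala p hp).1, (hvala p hp).2.2.1⟩)

-- fold two functions that agree under an invariant
theorem foldl_eq_of_inv {α β : Type} (f g : α → β → α) (P : α → Prop) (xs : List β)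
    (h : ∀ a x, x ∈ xs → P a → f a x = g a x ∧ P (f a x)) :
    ∀ a, P a → xs.foldl f a = xs.foldl g a := by
  induction xs with
  | nil => intro a _; rfl
  | cons x xs ih =>
      intro a ha
      have h1 := h a x (by simp) ha
      simp only [List.foldl_cons, h1.1]
      exact ih (fun b y hy hb => h b y (by simp [hy]) hb) _ (h1.1 ▸ h1.2)

-- ===== VERDICT (by name: the statement is the Claim_ definition above) =====
theorem rot_spec : Claim_equal_rot := by
  intro arr sx sy ex ey _ hpre
  show rot arr sx sy ex ey = rot_alt arr sx sy ex ey
  unfold rot rot_alt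
  by_cases hn : PySem.Int.floordiv (min (ex-sx) (ey-sy)) 2 ≤ 0
  · rw [PySem.List.pyRange_one_eq_nil hn]; rfl
  · rcases hpre with h | h
    · exact absurd h hn
    have h2n : PySem.Int.floordiv (min (ex-sx) (ey-sy)) 2 * 2 ≤ min (ex-sx) (ey-sy) :=
      (PySem.Int.le_floordiv_iff_mul_le (by norm_num)).1 le_rfl
    have hmx := min_le_left (ex-sx) (ey-sy)
    have hmy := min_le_right (ex-sx) (ey-sy)
    refine foldl_eq_of_inv _ _ (SameShape arr) _ ?_ arr ⟨rfl, fun _ => rfl⟩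
    intro a l hl ha
    have hm := PySem.List.mem_pyRange_one.1 hl
    have hx : sx + l + 2 ≤ ex - l := by omega
    have hy : sy + l + 2 ≤ ey - l := by omega
    have hval : ∀ p ∈ perimCoords sx sy ex ey l, ValidC arr p := by
      intro p hp
      have hb := mem_perim hp hm.1 hx hy
      obtain ⟨hsx, hsy, hex, hey⟩ := h
      refine ⟨by omega, by omega, by omega, ?_⟩
      have := hey p.1.toNat (by omega) (by omega) (by omega)
      omega
    exact ring_eq arr sx sy ex ey a l ha hx hy hval
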